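-- pv_equiv track=rewrite | github.com/NikitaDagon/SAOD | tasks.py | can_strings_win
-- ===== SOURCE A (Python) =====
-- def can_strings_win(s1, s2):
--     s1_sorted = sorted(s1)
--     s2_sorted = sorted(s2)
--     n = len(s1)
--     for i in range(n):
--         if s1_sorted[i] < s2_sorted[i]:
--             break
--     else:
--         return True
--     for i in range(n):
--         if s2_sorted[i] < s1_sorted[i]:
--             break
--     else:
--         return True
--     return False
-- ===== SOURCE B (Python) =====
-- def can_strings_win(s1, s2):
--     n = len(s1)
--     cnt1 = [0] * 128
--     cnt2 = [0] * 128
--     for ch in s1: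
--         cnt1[ord(ch)] += 1
--     for ch in s2:
--         cnt2[ord(ch)] += 1
--     c1 = 0
--     c2 = 0
--     ge_all = True   # sorted(s1) pointwise >= first n chars of sorted(s2)
--     le_all = True   # sorted(s1) pointwise <= first n chars of sorted(s2)
--     for k in range(128):
--         c1 += cnt1[k]
--         c2 += cnt2[k]
--         if c1 > c2:
--             ge_all = False
--         if c1 < min(c2, n):
--             le_all = False
--     return ge_all or le_all
-- ===== Notes on version B (the rewrite author's own statement) =====
-- stated objective: faster
-- what changed: B replaces sorting both strings and the two index-comparison scans by character counting: it builds two 128-entry count arrays in one pass over each string and decides both pointwise dominations from the cumulative counts in one pass over the alphabet (O(n + 128) instead of O(n log n)).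
import Mathlib
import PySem

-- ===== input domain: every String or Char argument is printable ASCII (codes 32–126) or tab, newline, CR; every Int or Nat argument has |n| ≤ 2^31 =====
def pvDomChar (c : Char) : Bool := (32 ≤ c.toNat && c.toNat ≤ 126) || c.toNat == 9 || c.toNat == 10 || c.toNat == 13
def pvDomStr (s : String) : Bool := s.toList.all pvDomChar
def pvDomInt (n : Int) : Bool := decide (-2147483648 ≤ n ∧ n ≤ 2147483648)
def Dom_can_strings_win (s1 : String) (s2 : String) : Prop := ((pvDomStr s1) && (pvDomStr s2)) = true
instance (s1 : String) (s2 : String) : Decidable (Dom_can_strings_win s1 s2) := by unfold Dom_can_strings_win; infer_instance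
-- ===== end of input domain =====

-- B replaces the two sort-and-scan passes by character counting: one pass over each string
-- builds count arrays, one pass over the 128 cumulative counts decides both dominations
-- (O(n + 128) instead of O(n log n)); equivalence of RETURN values proved below.

-- ===== PORT A =====
-- 'u[i] < v[i]' of A's loop bodies; the 'none' branches are Python's IndexError (outside Pre_)
def pvIdxLt (u : List Char) (v : List Char) (i : Nat) : Bool :=
  match u[i]?, v[i]? with
  | some x, some y => decide (x < y)
  | _, _ => false

def can_strings_win (s1 : String) (s2 : String) : Bool :=
  let s1_sorted := PySem.List.sorted s1.toList (fun c => c) false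
  let s2_sorted := PySem.List.sorted s2.toList (fun c => c) false
  let n := s1.toList.length
  -- 'for i in range(n): if …: break / else: return True' = return True iff no index breaks
  if !((List.range n).any (fun i => pvIdxLt s1_sorted s2_sorted i)) then true
  else if !((List.range n).any (fun i => pvIdxLt s2_sorted s1_sorted i)) then true
  else false

-- ===== PORT B =====
-- 'for ch in s: cnt[ord(ch)] += 1'  (ord(ch) < 128 on every admitted input, so List.set is exact)
def pvCounts (cs : List Char) : List Int :=
  cs.foldl (fun cnt ch => cnt.set ch.toNat (cnt.getD ch.toNat 0 + 1)) (List.replicate 128 (0 : Int))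

def can_strings_win_alt (s1 : String) (s2 : String) : Bool :=
  let n : Int := (s1.toList.length : Int)
  let cnt1 := pvCounts s1.toList
  let cnt2 := pvCounts s2.toList
  let st := (List.range 128).foldl (fun st k =>
      let c1 := st.1 + cnt1.getD k 0
      let c2 := st.2.1 + cnt2.getD k 0
      let ge_all := if c1 > c2 then false else st.2.2.1
      let le_all := if c1 < min c2 n then false else st.2.2.2
      (c1, c2, ge_all, le_all)) ((0 : Int), (0 : Int), true, true)
  st.2.2.1 || st.2.2.2

-- ===== PRECONDITION & SPEC =====
-- Pre_ admits exactly the inputs on which A returns: either s2 is at least as long as s1, or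
-- both of A's scans find a strictly smaller character before running off the end of sorted(s2)
-- (otherwise A raises IndexError).
def Pre_can_strings_win (s1 : String) (s2 : String) : Prop :=
  s1.toList.length ≤ s2.toList.length ∨
  ((∃ i < s2.toList.length,
      (PySem.List.sorted s1.toList (fun c => c) false).getD i default <
      (PySem.List.sorted s2.toList (fun c => c) false).getD i default) ∧
   (∃ j < s2.toList.length,
      (PySem.List.sorted s2.toList (fun c => c) false).getD j default <
      (PySem.List.sorted s1.toList (fun c => c) false).getD j default))
instance (s1 : String) (s2 : String) : Decidable (Pre_can_strings_win s1 s2) := by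
  unfold Pre_can_strings_win; infer_instance

def pvWitness_can_strings_win : String × String := ("ab", "ba")

def Spec_can_strings_win (s1 : String) (s2 : String) (out : Bool) : Prop := out = can_strings_win_alt s1 s2
instance (s1 : String) (s2 : String) (out : Bool) : Decidable (Spec_can_strings_win s1 s2 out) := by unfold Spec_can_strings_win; infer_instance

-- ===== CLAIM (what is proved, stated in full; the proofs are below) =====
def Claim_equal_can_strings_win : Prop := ∀ (s1 : String) (s2 : String), Dom_can_strings_win s1 s2 → Pre_can_strings_win s1 s2 → Spec_can_strings_win s1 s2 (can_strings_win s1 s2)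

-- ===== LEMMAS AND PROOFS =====

def pvCum (cs : List Char) (k : Nat) : Nat := cs.countP (fun c => decide (c.toNat ≤ k))

lemma char_le_iff (x y : Char) : x ≤ y ↔ x.toNat ≤ y.toNat := by
  rw [Char.le_def, UInt32.le_iff_toNat_le]; rfl

lemma char_lt_iff (x y : Char) : x < y ↔ x.toNat < y.toNat := by
  rw [Char.lt_def, UInt32.lt_iff_toNat_lt]; rfl

lemma cum_pointwise {l1 l2 : List Char} (h : l1.length = l2.length)
    (hpw : ∀ i (hi : i < l1.length), l1[i] ≤ l2[i]'(h ▸ hi)) (k : Nat) :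
    pvCum l2 k ≤ pvCum l1 k := by
  induction l1 generalizing l2 with
  | nil => cases l2 with
    | nil => simp
    | cons y t => simp at h
  | cons x t ih =>
    cases l2 with
    | nil => simp at h
    | cons y u =>
      simp only [List.length_cons, Nat.succ.injEq] at h
      have hxy : x ≤ y := hpw 0 (by simp)
      have hrec : pvCum u k ≤ pvCum t k := by
        refine ih (by omega) ?_
        intro i hi
        exact hpw (i+1) (by simpa using Nat.succ_lt_succ hi)
      unfold pvCum at *
      simp only [List.countP_cons]
      have : (decide (y.toNat ≤ k) = true) → (decide (x.toNat ≤ k) = true) := by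
        intro hy
        simp at hy ⊢
        exact le_trans ((char_le_iff x y).1 hxy) hy
      by_cases hy : y.toNat ≤ k <;> by_cases hx : x.toNat ≤ k <;> simp [hy, hx] at this ⊢ <;> omega

lemma cum_ge_of_getElem_le {l : List Char} (hs : l.Pairwise (· ≤ ·)) {i k : Nat}
    (hi : i < l.length) (h : l[i].toNat ≤ k) : i + 1 ≤ pvCum l k := by
  have hsub : (l.take (i+1)).Sublist l := List.take_sublist _ _
  have hlen : (l.take (i+1)).length = i + 1 := by
    simp [List.length_take]; omega
  have hall : ∀ a ∈ l.take (i+1), (fun c => decide (c.toNat ≤ k)) a = true := by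
    intro a ha
    rw [List.mem_take_iff_getElem] at ha
    obtain ⟨j, hj, rfl⟩ := ha
    have hji : j ≤ i := by omega
    have hle : l[j]'(by omega) ≤ l[i] := by
      rcases Nat.lt_or_ge j i with hlt | hge
      · exact (List.pairwise_iff_getElem.1 hs) j i _ _ hlt
      · have : j = i := by omega
        subst this; exact le_refl _
    simp only [decide_eq_true_eq]
    calc (l[j]'(by omega)).toNat ≤ l[i].toNat := (char_le_iff _ _).1 hle
      _ ≤ k := h
  have : pvCum (l.take (i+1)) k = i + 1 := by
    unfold pvCum
    rw [List.countP_eq_length.2 hall, hlen]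
  calc i + 1 = pvCum (l.take (i+1)) k := this.symm
    _ ≤ pvCum l k := hsub.countP_le

lemma cum_le_of_getElem_gt {l : List Char} (hs : l.Pairwise (· ≤ ·)) {i k : Nat}
    (hi : i < l.length) (h : k < l[i].toNat) : pvCum l k ≤ i := by
  have hsplit : pvCum l k = pvCum (l.take i) k + pvCum (l.drop i) k := by
    unfold pvCum
    rw [← List.countP_append, List.take_append_drop]
  have hdrop : pvCum (l.drop i) k = 0 := by
    unfold pvCum
    rw [List.countP_eq_zero]
    intro a ha
    rw [List.mem_drop_iff_getElem] at ha
    obtain ⟨j, hj, rfl⟩ := ha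
    have hle : l[i] ≤ l[i+j]'(by omega) := by
      rcases Nat.eq_zero_or_pos j with rfl | hpos
      · simp
      · exact (List.pairwise_iff_getElem.1 hs) i (i+j) _ _ (by omega)
    simp only [decide_eq_true_eq, Nat.not_le]
    calc k < l[i].toNat := h
      _ ≤ _ := (char_le_iff _ _).1 hle
  have htake : pvCum (l.take i) k ≤ i := by
    unfold pvCum
    calc List.countP _ _ ≤ (l.take i).length := List.countP_le_length
      _ ≤ i := by simp [List.length_take]
  omega

lemma sorted_countP_take {l : List Char} (hs : l.Pairwise (· ≤ ·)) (n k : Nat) :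
    pvCum (l.take n) k = min (pvCum l k) n := by
  induction l generalizing n with
  | nil => simp [pvCum]
  | cons x t ih =>
    have hst : t.Pairwise (· ≤ ·) := hs.of_cons
    cases n with
    | zero => simp [pvCum]
    | succ m =>
      by_cases hx : x.toNat ≤ k
      · have := ih hst m
        unfold pvCum at *
        simp [List.take_succ_cons, hx] at *
        omega
      · have hzero : pvCum t k = 0 := by
          unfold pvCum
          rw [List.countP_eq_zero]
          intro a ha
          have : x ≤ a := (List.pairwise_cons.1 hs).1 a ha
          simp only [decide_eq_true_eq, Nat.not_le]
          have := (char_le_iff x a).1 this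
          omega
        have hzero' : pvCum (t.take m) k = 0 := by
          have h1 : pvCum (t.take m) k ≤ pvCum t k :=
            (List.take_sublist _ _).countP_le
          omega
        have hx' : (decide (x.toNat ≤ k)) = false := by simp [hx]
        unfold pvCum at hzero hzero' ⊢
        rw [List.take_succ_cons, List.countP_cons, List.countP_cons, hx']
        simp only [Bool.false_eq_true, if_false]
        omega

lemma ge_iff_cum {a b : List Char} (ha : a.Pairwise (· ≤ ·)) (hb : b.Pairwise (· ≤ ·))
    (hn : a.length ≤ b.length)
    (hca : ∀ c ∈ a, c.toNat < 128) :
    (∀ i (hi : i < a.length), b[i]'(lt_of_lt_of_le hi hn) ≤ a[i]) ↔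
      (∀ k < 128, pvCum a k ≤ pvCum b k) := by
  constructor
  · intro hpw k _
    have h1 : pvCum a k ≤ pvCum (b.take a.length) k := by
      refine cum_pointwise (l1 := b.take a.length) (l2 := a) (by simp; omega) ?_ k
      intro i hi
      have hi' : i < a.length := by simp [List.length_take] at hi; omega
      have : (b.take a.length)[i]'hi = b[i]'(by omega) := List.getElem_take ..
      rw [this]
      exact hpw i hi'
    calc pvCum a k ≤ pvCum (b.take a.length) k := h1
      _ ≤ pvCum b k := (List.take_sublist _ _).countP_le
  · intro hcum i hi
    by_contra hlt
    rw [not_le] at hlt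
    set k := a[i].toNat with hk
    have hk128 : k < 128 := hca _ (List.getElem_mem hi)
    have h1 : i + 1 ≤ pvCum a k := cum_ge_of_getElem_le ha hi (le_refl _)
    have h2 : pvCum b k ≤ i := by
      refine cum_le_of_getElem_gt hb (lt_of_lt_of_le hi hn) ?_
      exact (char_lt_iff _ _).1 hlt
    have := hcum k hk128
    omega

lemma le_iff_cum {a b : List Char} (ha : a.Pairwise (· ≤ ·)) (hb : b.Pairwise (· ≤ ·))
    (hn : a.length ≤ b.length)
    (hcb : ∀ c ∈ b, c.toNat < 128) :
    (∀ i (hi : i < a.length), a[i] ≤ b[i]'(lt_of_lt_of_le hi hn)) ↔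
      (∀ k < 128, min (pvCum b k) a.length ≤ pvCum a k) := by
  constructor
  · intro hpw k _
    have htake : pvCum (b.take a.length) k = min (pvCum b k) a.length :=
      sorted_countP_take hb _ _
    rw [← htake]
    refine cum_pointwise (l1 := a) (l2 := b.take a.length) (by simp; omega) ?_ k
    intro i hi
    have : (b.take a.length)[i]'(by simp [List.length_take]; omega) = b[i]'(by omega) :=
      List.getElem_take ..
    rw [this]
    exact hpw i hi
  · intro hcum i hi
    by_contra hlt
    rw [not_le] at hlt
    set k := b[i]'(lt_of_lt_of_le hi hn) |>.toNat with hk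
    have hk128 : k < 128 := hcb _ (List.getElem_mem _)
    have h1 : i + 1 ≤ pvCum b k := cum_ge_of_getElem_le hb (lt_of_lt_of_le hi hn) (le_refl _)
    have h2 : pvCum a k ≤ i := by
      refine cum_le_of_getElem_gt ha hi ?_
      exact (char_lt_iff _ _).1 hlt
    have := hcum k hk128
    omega

lemma pvCounts_getD_gen (cs : List Char) (acc : List Int) (hlen : acc.length = 128)
    (hcs : ∀ c ∈ cs, c.toNat < 128) (k : Nat) (hk : k < 128) :
    (cs.foldl (fun cnt ch => cnt.set ch.toNat (cnt.getD ch.toNat 0 + 1)) acc).getD k 0 =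
      acc.getD k 0 + (cs.countP (fun c => c.toNat == k) : Int) := by
  induction cs generalizing acc with
  | nil => simp
  | cons c t ih =>
    simp only [List.foldl_cons]
    have hc : c.toNat < 128 := hcs c (by simp)
    have hlen' : (acc.set c.toNat (acc.getD c.toNat 0 + 1)).length = 128 := by simp [hlen]
    rw [ih _ hlen' (fun x hx => hcs x (by simp [hx]))]
    by_cases hck : c.toNat = k
    · subst hck
      have hset : (acc.set c.toNat (acc.getD c.toNat 0 + 1)).getD c.toNat 0 = acc.getD c.toNat 0 + 1 := by
        rw [List.getD, List.getElem?_set_self (by omega), Option.getD_some]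
      rw [hset, List.countP_cons]
      simp
      ring
    · have hset : (acc.set c.toNat (acc.getD c.toNat 0 + 1)).getD k 0 = acc.getD k 0 := by
        rw [List.getD, List.getElem?_set_ne hck, ← List.getD]
      rw [hset, List.countP_cons]
      simp [hck]

lemma pvCounts_getD {cs : List Char} (hcs : ∀ c ∈ cs, c.toNat < 128) {k : Nat} (hk : k < 128) :
    (pvCounts cs).getD k 0 = (cs.countP (fun c => c.toNat == k) : Int) := by
  unfold pvCounts
  rw [pvCounts_getD_gen cs _ (by simp) hcs k hk, List.getD, List.getElem?_replicate]
  simp only [if_pos hk, Option.getD_some, zero_add]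

lemma countP_lt_succ (cs : List Char) (m : Nat) :
    cs.countP (fun c => decide (c.toNat < m + 1)) =
      cs.countP (fun c => decide (c.toNat < m)) + cs.countP (fun c => c.toNat == m) := by
  induction cs with
  | nil => simp
  | cons c t ih =>
    simp only [List.countP_cons, ih]
    by_cases h1 : c.toNat < m
    · simp [h1, Nat.le_of_lt h1, Nat.ne_of_lt h1]
      omega
    · by_cases h2 : c.toNat = m
      · simp [h2]
        omega
      · have h3 : ¬ c.toNat < m + 1 := by omega
        simp [h1, h2, h3]

lemma cum_eq_lt_succ (cs : List Char) (m : Nat) :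
    cs.countP (fun c => decide (c.toNat < m + 1)) = pvCum cs m := by
  unfold pvCum
  refine List.countP_congr ?_
  intro a _
  simp [Nat.lt_succ_iff]

lemma B_fold (cs1 cs2 : List Char) (nn : Int)
    (h1 : ∀ c ∈ cs1, c.toNat < 128) (h2 : ∀ c ∈ cs2, c.toNat < 128) (m : Nat) (hm : m ≤ 128) :
    (List.range m).foldl (fun st k =>
      let c1 := st.1 + (pvCounts cs1).getD k 0
      let c2 := st.2.1 + (pvCounts cs2).getD k 0
      let ge_all := if c1 > c2 then false else st.2.2.1
      let le_all := if c1 < min c2 nn then false else st.2.2.2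
      (c1, c2, ge_all, le_all)) ((0 : Int), (0 : Int), true, true) =
    ((cs1.countP (fun c => decide (c.toNat < m)) : Int),
     (cs2.countP (fun c => decide (c.toNat < m)) : Int),
     decide (∀ j < m, pvCum cs1 j ≤ pvCum cs2 j),
     decide (∀ j < m, min ((pvCum cs2 j : Int)) nn ≤ (pvCum cs1 j : Int))) := by
  induction m with
  | zero => simp
  | succ p ih =>
    rw [List.range_succ, List.foldl_append, ih (by omega), List.foldl_cons, List.foldl_nil]
    have hp : p < 128 := by omega
    have e1 : ((cs1.countP (fun c => decide (c.toNat < p)) : Int)) + (pvCounts cs1).getD p 0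
        = ((pvCum cs1 p : Int)) := by
      rw [pvCounts_getD h1 hp, ← cum_eq_lt_succ cs1 p, countP_lt_succ]
      push_cast; ring
    have e2 : ((cs2.countP (fun c => decide (c.toNat < p)) : Int)) + (pvCounts cs2).getD p 0
        = ((pvCum cs2 p : Int)) := by
      rw [pvCounts_getD h2 hp, ← cum_eq_lt_succ cs2 p, countP_lt_succ]
      push_cast; ring
    simp only [e1, e2]
    refine Prod.ext ?_ (Prod.ext ?_ (Prod.ext ?_ ?_))
    · simp [← cum_eq_lt_succ cs1 p]
    · simp [← cum_eq_lt_succ cs2 p]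
    · show (if ((pvCum cs1 p : Int)) > ((pvCum cs2 p : Int)) then false
            else decide (∀ j < p, pvCum cs1 j ≤ pvCum cs2 j))
          = decide (∀ j < p + 1, pvCum cs1 j ≤ pvCum cs2 j)
      by_cases hgt : ((pvCum cs1 p : Int)) > ((pvCum cs2 p : Int))
      · have hnp : ¬ (pvCum cs1 p ≤ pvCum cs2 p) := by exact_mod_cast not_le.2 hgt
        rw [if_pos hgt]
        symm
        rw [decide_eq_false_iff_not]
        intro h
        exact hnp (h p (by omega))
      · have hyp : pvCum cs1 p ≤ pvCum cs2 p := by exact_mod_cast not_lt.1 hgt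
        rw [if_neg hgt]
        exact decide_eq_decide.2
          ⟨fun h => Nat.forall_lt_succ_right.2 ⟨h, hyp⟩, fun h j hj => h j (by omega)⟩
    · show (if ((pvCum cs1 p : Int)) < min ((pvCum cs2 p : Int)) nn then false
            else decide (∀ j < p, min ((pvCum cs2 j : Int)) nn ≤ (pvCum cs1 j : Int)))
          = decide (∀ j < p + 1, min ((pvCum cs2 j : Int)) nn ≤ (pvCum cs1 j : Int))
      by_cases hlt : ((pvCum cs1 p : Int)) < min ((pvCum cs2 p : Int)) nn
      · rw [if_pos hlt]
        symm
        rw [decide_eq_false_iff_not]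
        intro h
        exact absurd (h p (by omega)) (not_le.2 hlt)
      · rw [if_neg hlt]
        exact decide_eq_decide.2
          ⟨fun h => Nat.forall_lt_succ_right.2 ⟨h, not_lt.1 hlt⟩, fun h j hj => h j (by omega)⟩


lemma any_idxLt_iff {u v : List Char} (n : Nat) (hu : n ≤ u.length) (hv : n ≤ v.length) :
    ((List.range n).any (fun i => pvIdxLt u v i) = true) ↔
      ¬ (∀ i (hi : i < n), v[i]'(lt_of_lt_of_le hi hv) ≤ u[i]'(lt_of_lt_of_le hi hu)) := by
  rw [List.any_eq_true]
  constructor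
  · rintro ⟨i, hi, hf⟩
    rw [List.mem_range] at hi
    unfold pvIdxLt at hf
    rw [List.getElem?_eq_getElem (lt_of_lt_of_le hi hu),
        List.getElem?_eq_getElem (lt_of_lt_of_le hi hv)] at hf
    simp only [decide_eq_true_eq] at hf
    intro hall
    exact absurd (hall i hi) (not_le.2 hf)
  · intro h
    push Not at h
    obtain ⟨i, hi, hlt⟩ := h
    refine ⟨i, List.mem_range.2 hi, ?_⟩
    unfold pvIdxLt
    rw [List.getElem?_eq_getElem (lt_of_lt_of_le hi hu),
        List.getElem?_eq_getElem (lt_of_lt_of_le hi hv)]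
    simp only [decide_eq_true_eq]
    exact hlt

lemma domCharLt128 {c : Char} (h : pvDomChar c = true) : c.toNat < 128 := by
  unfold pvDomChar at h
  simp at h
  omega



theorem can_strings_win_agree (s1 s2 : String)
    (hd : ((pvDomStr s1) && (pvDomStr s2)) = true)
    (hp : s1.toList.length ≤ s2.toList.length) :
    can_strings_win s1 s2 = can_strings_win_alt s1 s2 := by
  rw [Bool.and_eq_true] at hd
  have hd1 : ∀ c ∈ s1.toList, c.toNat < 128 := fun c hc =>
    domCharLt128 (List.all_eq_true.1 hd.1 c hc)
  have hd2 : ∀ c ∈ s2.toList, c.toNat < 128 := fun c hc =>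
    domCharLt128 (List.all_eq_true.1 hd.2 c hc)
  have hpa : (PySem.List.sorted s1.toList (fun c => c) false).Pairwise (· ≤ ·) :=
    PySem.List.sorted_pairwise s1.toList (fun c => c)
  have hpb : (PySem.List.sorted s2.toList (fun c => c) false).Pairwise (· ≤ ·) :=
    PySem.List.sorted_pairwise s2.toList (fun c => c)
  have hperma := PySem.List.sorted_perm s1.toList (fun c => c) false
  have hpermb := PySem.List.sorted_perm s2.toList (fun c => c) false
  set a := PySem.List.sorted s1.toList (fun c => c) false with ha
  set b := PySem.List.sorted s2.toList (fun c => c) false with hb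
  have hla : a.length = s1.toList.length := hperma.length_eq
  have hlb : b.length = s2.toList.length := hpermb.length_eq
  have hn : a.length ≤ b.length := by omega
  have hca : ∀ c ∈ a, c.toNat < 128 := fun c hc => hd1 c (hperma.mem_iff.1 hc)
  have hcb : ∀ c ∈ b, c.toNat < 128 := fun c hc => hd2 c (hpermb.mem_iff.1 hc)
  have hcum1 : ∀ k, pvCum a k = pvCum s1.toList k := fun k => hperma.countP_eq _
  have hcum2 : ∀ k, pvCum b k = pvCum s2.toList k := fun k => hpermb.countP_eq _
  -- A's value is a disjunction of the two scans
  have hA : can_strings_win s1 s2 =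
      ((!((List.range s1.toList.length).any (fun i => pvIdxLt a b i))) ||
       (!((List.range s1.toList.length).any (fun i => pvIdxLt b a i)))) := by
    show (if !((List.range s1.toList.length).any (fun i => pvIdxLt a b i)) then true
          else if !((List.range s1.toList.length).any (fun i => pvIdxLt b a i)) then true
          else false) = _
    cases hx : ((List.range s1.toList.length).any (fun i => pvIdxLt a b i)) <;>
      cases hy : ((List.range s1.toList.length).any (fun i => pvIdxLt b a i)) <;> rfl
  -- B's value via the loop invariant
  have hB : can_strings_win_alt s1 s2 =
      (((List.range 128).foldl (fun st k =>
          let c1 := st.1 + (pvCounts s1.toList).getD k 0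
          let c2 := st.2.1 + (pvCounts s2.toList).getD k 0
          let ge_all := if c1 > c2 then false else st.2.2.1
          let le_all := if c1 < min c2 ((s1.toList.length : Int)) then false else st.2.2.2
          (c1, c2, ge_all, le_all)) ((0 : Int), (0 : Int), true, true)).2.2.1 ||
       ((List.range 128).foldl (fun st k =>
          let c1 := st.1 + (pvCounts s1.toList).getD k 0
          let c2 := st.2.1 + (pvCounts s2.toList).getD k 0
          let ge_all := if c1 > c2 then false else st.2.2.1
          let le_all := if c1 < min c2 ((s1.toList.length : Int)) then false else st.2.2.2
          (c1, c2, ge_all, le_all)) ((0 : Int), (0 : Int), true, true)).2.2.2) := by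
    simp only [can_strings_win_alt]
  rw [hA, hB, B_fold s1.toList s2.toList ((s1.toList.length : Int)) hd1 hd2 128 (le_refl _)]
  rw [Bool.eq_iff_iff]
  simp only [Bool.or_eq_true, Bool.not_eq_eq_eq_not, Bool.not_true, decide_eq_true_eq]
  rw [← hla]
  have hAB := any_idxLt_iff (u := a) (v := b) a.length (le_refl _) hn
  have hBA := any_idxLt_iff (u := b) (v := a) a.length hn (le_refl _)
  refine or_congr ?_ ?_
  · constructor
    · intro hfalse j hj
      have hne : ¬ (((List.range a.length).any fun i => pvIdxLt a b i) = true) := by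
        simp [hfalse]
      have hPge := not_not.1 ((not_congr hAB).1 hne)
      rw [← hcum1, ← hcum2]
      exact (ge_iff_cum hpa hpb hn hca).1 hPge j hj
    · intro hcums
      have hPge := (ge_iff_cum hpa hpb hn hca).2 (fun k hk => by
        rw [hcum1, hcum2]; exact hcums k hk)
      exact Bool.eq_false_iff.2 (fun ht => (hAB.1 ht) hPge)
  · have hcast : ∀ j, (min ((pvCum s2.toList j : Int)) ((a.length : Int)) ≤ (pvCum s1.toList j : Int)) ↔
        (min (pvCum b j) a.length ≤ pvCum a j) := by
      intro j
      rw [hcum1, hcum2]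
      omega
    constructor
    · intro hfalse j hj
      have hne : ¬ (((List.range a.length).any fun i => pvIdxLt b a i) = true) := by
        simp [hfalse]
      have hPle := not_not.1 ((not_congr hBA).1 hne)
      rw [hcast]
      exact (le_iff_cum hpa hpb hn hcb).1 hPle j hj
    · intro hcums
      have hPle := (le_iff_cum hpa hpb hn hcb).2 (fun k hk => (hcast k).1 (hcums k hk))
      exact Bool.eq_false_iff.2 (fun ht => (hBA.1 ht) hPle)

theorem can_strings_win_agree2 (s1 s2 : String)
    (hd : ((pvDomStr s1) && (pvDomStr s2)) = true)
    (hl2 : s2.toList.length < s1.toList.length)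
    (hE1 : ∃ i < s2.toList.length,
      (PySem.List.sorted s1.toList (fun c => c) false).getD i default <
      (PySem.List.sorted s2.toList (fun c => c) false).getD i default)
    (hE2 : ∃ j < s2.toList.length,
      (PySem.List.sorted s2.toList (fun c => c) false).getD j default <
      (PySem.List.sorted s1.toList (fun c => c) false).getD j default) :
    can_strings_win s1 s2 = can_strings_win_alt s1 s2 := by
  rw [Bool.and_eq_true] at hd
  have hd1 : ∀ c ∈ s1.toList, c.toNat < 128 := fun c hc =>
    domCharLt128 (List.all_eq_true.1 hd.1 c hc)
  have hd2 : ∀ c ∈ s2.toList, c.toNat < 128 := fun c hc =>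
    domCharLt128 (List.all_eq_true.1 hd.2 c hc)
  have hpa : (PySem.List.sorted s1.toList (fun c => c) false).Pairwise (· ≤ ·) :=
    PySem.List.sorted_pairwise s1.toList (fun c => c)
  have hpb : (PySem.List.sorted s2.toList (fun c => c) false).Pairwise (· ≤ ·) :=
    PySem.List.sorted_pairwise s2.toList (fun c => c)
  have hperma := PySem.List.sorted_perm s1.toList (fun c => c) false
  have hpermb := PySem.List.sorted_perm s2.toList (fun c => c) false
  set a := PySem.List.sorted s1.toList (fun c => c) false with ha
  set b := PySem.List.sorted s2.toList (fun c => c) false with hb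
  have hla : a.length = s1.toList.length := hperma.length_eq
  have hlb : b.length = s2.toList.length := hpermb.length_eq
  have hca : ∀ c ∈ a, c.toNat < 128 := fun c hc => hd1 c (hperma.mem_iff.1 hc)
  have hcb : ∀ c ∈ b, c.toNat < 128 := fun c hc => hd2 c (hpermb.mem_iff.1 hc)
  have hcum1 : ∀ k, pvCum a k = pvCum s1.toList k := fun k => hperma.countP_eq _
  have hcum2 : ∀ k, pvCum b k = pvCum s2.toList k := fun k => hpermb.countP_eq _
  -- A returns False: both scans find a smaller character
  obtain ⟨i, hi, hiv⟩ := hE1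
  obtain ⟨j, hj, hjv⟩ := hE2
  have hia : i < a.length := by omega
  have hib : i < b.length := by omega
  have hja : j < a.length := by omega
  have hjb : j < b.length := by omega
  have hgd : ∀ (l : List Char) (i : Nat) (h : i < l.length), l.getD i default = l[i] := by
    intro l i h
    rw [List.getD, List.getElem?_eq_getElem h, Option.getD_some]
  rw [hgd a i hia, hgd b i hib] at hiv
  rw [hgd a j hja, hgd b j hjb] at hjv
  have hany1 : ((List.range s1.toList.length).any (fun i => pvIdxLt a b i)) = true := by
    rw [List.any_eq_true]
    refine ⟨i, List.mem_range.2 (by omega), ?_⟩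
    unfold pvIdxLt
    rw [List.getElem?_eq_getElem hia, List.getElem?_eq_getElem hib]
    simp only [decide_eq_true_eq]
    exact hiv
  have hany2 : ((List.range s1.toList.length).any (fun i => pvIdxLt b a i)) = true := by
    rw [List.any_eq_true]
    refine ⟨j, List.mem_range.2 (by omega), ?_⟩
    unfold pvIdxLt
    rw [List.getElem?_eq_getElem hjb, List.getElem?_eq_getElem hja]
    simp only [decide_eq_true_eq]
    exact hjv
  have hA : can_strings_win s1 s2 = false := by
    show (if !((List.range s1.toList.length).any (fun i => pvIdxLt a b i)) then true
          else if !((List.range s1.toList.length).any (fun i => pvIdxLt b a i)) then true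
          else false) = false
    rw [hany1, hany2]
    rfl
  -- B returns False: both cumulative conditions fail
  have h0 : can_strings_win_alt s1 s2 =
      (((List.range 128).foldl (fun st k =>
          let c1 := st.1 + (pvCounts s1.toList).getD k 0
          let c2 := st.2.1 + (pvCounts s2.toList).getD k 0
          let ge_all := if c1 > c2 then false else st.2.2.1
          let le_all := if c1 < min c2 ((s1.toList.length : Int)) then false else st.2.2.2
          (c1, c2, ge_all, le_all)) ((0 : Int), (0 : Int), true, true)).2.2.1 ||
       ((List.range 128).foldl (fun st k =>
          let c1 := st.1 + (pvCounts s1.toList).getD k 0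
          let c2 := st.2.1 + (pvCounts s2.toList).getD k 0
          let ge_all := if c1 > c2 then false else st.2.2.1
          let le_all := if c1 < min c2 ((s1.toList.length : Int)) then false else st.2.2.2
          (c1, c2, ge_all, le_all)) ((0 : Int), (0 : Int), true, true)).2.2.2) := by
    simp only [can_strings_win_alt]
  rw [hA, h0, B_fold s1.toList s2.toList ((s1.toList.length : Int)) hd1 hd2 128 (le_refl _)]
  symm
  rw [Bool.or_eq_false_iff]
  constructor
  · rw [decide_eq_false_iff_not]
    intro h
    have h127 := h 127 (by omega)
    have hfull : pvCum s1.toList 127 = s1.toList.length := by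
      unfold pvCum
      rw [List.countP_eq_length]
      intro c hc
      simp only [decide_eq_true_eq]
      have := hd1 c hc
      omega
    have hle2 : pvCum s2.toList 127 ≤ s2.toList.length := List.countP_le_length
    omega
  · rw [decide_eq_false_iff_not]
    intro h
    set k := b[j].toNat with hk
    have hk128 : k < 128 := hcb _ (List.getElem_mem _)
    have h1 : j + 1 ≤ pvCum b k := cum_ge_of_getElem_le hpb hjb (le_refl _)
    have h2 : pvCum a k ≤ j := cum_le_of_getElem_gt hpa hja ((char_lt_iff _ _).1 hjv)
    have := h k hk128
    rw [← hcum1, ← hcum2] at this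
    omega

-- ===== VERDICT (by name: the statement is the Claim_ definition above) =====
theorem can_strings_win_spec : Claim_equal_can_strings_win := by
  intro s1 s2 hd hp
  unfold Spec_can_strings_win
  rcases hp with hp | ⟨hE1, hE2⟩
  · exact can_strings_win_agree s1 s2 hd hp
  · rcases Nat.lt_or_ge s2.toList.length s1.toList.length with hl | hl
    · exact can_strings_win_agree2 s1 s2 hd hl hE1 hE2
    · exact can_strings_win_agree s1 s2 hd hl
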